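-- pv_equiv track=rewrite | github.com/Darshanaborthakur/Algorithm | PowerTowers.py | place_base_stations
-- ===== SOURCE A (Python) =====
-- def place_base_stations(A):
--     # Sort the house positions in increasing order
--     A.sort()
--
--     # Initialize the variable to keep track of the number of base stations placed
--     num_base_stations = 0
--
--     # Start with the left-most house
--     left_most_house = A[0]
--
--     # Continue until all houses are covered
--     while A:
--         # Place a base station 4km to the right of the left-most house
--         base_station_position = left_most_house + 4
--
--         # Increment the count of base stations placed
--         num_base_stations += 1
--
--         # Remove houses covered by this base station
--         A = [house for house in A if house > base_station_position]
--
--         # If there are remaining houses, update the left-most house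
--         if A:
--             left_most_house = A[0]
--
--     return num_base_stations
-- ===== SOURCE B (Python) =====
-- def place_base_stations(A):
--     # One linear pass over the sorted houses, tracking the rightmost covered point.
--     A.sort()
--     count = 0
--     bound = None
--     for h in A:
--         if bound is None or h > bound:
--             count += 1
--             bound = h + 4
--     return count
-- ===== Notes on version B (the rewrite author's own statement) =====
-- stated objective: faster
-- what changed: replaces the repeated list-filter passes (one whole-list comprehension per station) by a single linear sweep over the sorted list tracking the current coverage boundary; Pre_ excludes the empty list, on which A raises IndexError
import Mathlib
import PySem

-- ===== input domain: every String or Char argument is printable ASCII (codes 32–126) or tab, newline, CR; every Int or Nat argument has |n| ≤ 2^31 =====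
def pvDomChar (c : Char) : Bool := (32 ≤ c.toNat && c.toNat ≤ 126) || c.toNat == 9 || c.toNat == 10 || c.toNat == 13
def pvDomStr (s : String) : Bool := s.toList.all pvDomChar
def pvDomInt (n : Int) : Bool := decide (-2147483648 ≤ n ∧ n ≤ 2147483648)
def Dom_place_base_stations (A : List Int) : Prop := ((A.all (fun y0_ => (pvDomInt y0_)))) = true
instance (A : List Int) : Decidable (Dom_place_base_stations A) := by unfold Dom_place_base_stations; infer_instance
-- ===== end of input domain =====

-- B replaces A's repeated filter passes by one linear sweep over the sorted list tracking a coverage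
-- boundary; both sort the argument in place in Python (return-value equivalence is what is proved).


-- ===== PORT A =====
-- while A: place station at leftmost+4 (leftmost is always the head of the current sorted list),
-- count it, drop covered houses by filtering the whole list
def pvLoopA : List Int → Int → Int
  | [], n => n
  | x :: t, n =>
      pvLoopA ((x :: t).filter (fun house => decide (x + 4 < house))) (n + 1)
termination_by xs _ => xs.length
decreasing_by
  simp only [List.filter_cons, decide_eq_true_eq]
  have h1 : ¬ (x + 4 < x) := by omega
  simp only [h1, if_false]
  exact Nat.lt_succ_of_le (List.length_filter_le _ _)


def place_base_stations (A : List Int) : Int :=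
  let s := PySem.List.sorted A (fun x => x) false
  -- reading its first-element read on the empty list raises IndexError in Python (excluded by Pre_)
  pvLoopA s 0

-- ===== PORT B =====
def pvStepB (st : Int × Option Int) (h : Int) : Int × Option Int :=
  match st.2 with
  | none => (st.1 + 1, some (h + 4))
  | some b => if b < h then (st.1 + 1, some (h + 4)) else st

def place_base_stations_alt (A : List Int) : Int :=
  let s := PySem.List.sorted A (fun x => x) false
  (s.foldl pvStepB (0, none)).1

-- ===== PRECONDITION & SPEC =====
-- Pre_ excludes only the empty list, on which A raises IndexError reading the first house
def Pre_place_base_stations (A : List Int) : Prop := A ≠ []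
instance (A : List Int) : Decidable (Pre_place_base_stations A) := by unfold Pre_place_base_stations; infer_instance
def pvWitness_place_base_stations : List Int := ([3, -1, 10])

def Spec_place_base_stations (A : List Int) (out : Int) : Prop := out = place_base_stations_alt A
instance (A : List Int) (out : Int) : Decidable (Spec_place_base_stations A out) := by unfold Spec_place_base_stations; infer_instance

-- ===== CLAIM (what is proved, stated in full; the proofs are below) =====
def Claim_equal_place_base_stations : Prop := ∀ (A : List Int), Dom_place_base_stations A → Pre_place_base_stations A → Spec_place_base_stations A (place_base_stations A)

-- ===== LEMMAS AND PROOFS =====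
theorem pvLoopA_nil (n : Int) : pvLoopA [] n = n := by rw [pvLoopA]

theorem pvLoopA_cons (x : Int) (t : List Int) (n : Int) :
    pvLoopA (x :: t) n = pvLoopA ((x :: t).filter (fun house => decide (x + 4 < house))) (n + 1) := by
  rw [pvLoopA]


-- B's fold from a set boundary b counts exactly the stations A's loop places on the houses beyond b.
theorem pvFold_eq_loopA (s : List Int) : ∀ (n b : Int),
    (s.foldl pvStepB (n, some b)).1 = pvLoopA (s.filter (fun h => decide (b < h))) n := by
  induction s with
  | nil => intro n b; simp [pvLoopA_nil]
  | cons x t ih =>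
    intro n b
    by_cases hx : b < x
    · have hfx : (x :: t).filter (fun h => decide (b < h)) = x :: t.filter (fun h => decide (b < h)) := by
        simp [hx]
      rw [hfx]
      show (t.foldl pvStepB (pvStepB (n, some b) x)).1 = _
      rw [show pvStepB (n, some b) x = (n + 1, some (x + 4)) by simp [pvStepB, hx]]
      rw [ih (n + 1) (x + 4)]
      have hnot : ¬ (x + 4 < x) := by omega
      rw [pvLoopA_cons]
      simp only [List.filter_cons, decide_eq_true_eq, hnot, if_false]
      have harg : List.filter (fun house => decide (x + 4 < house)) (List.filter (fun h => decide (b < h)) t)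
          = List.filter (fun house => decide (x + 4 < house)) t := by
        rw [List.filter_filter]
        apply List.filter_congr
        intro a _
        by_cases h4 : x + 4 < a
        · have hb : b < a := by omega
          simp [h4, hb]
        · simp [h4]
      rw [harg]
    · have hfx : (x :: t).filter (fun h => decide (b < h)) = t.filter (fun h => decide (b < h)) := by
        simp [hx]
      rw [hfx]
      show (t.foldl pvStepB (pvStepB (n, some b) x)).1 = _
      rw [show pvStepB (n, some b) x = (n, some b) by simp [pvStepB, hx]]
      exact ih n b

theorem pvMain (x : Int) (t : List Int) :
    pvLoopA (x :: t) 0 = ((x :: t).foldl pvStepB (0, none)).1 := by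
  show pvLoopA (x :: t) 0 = (t.foldl pvStepB (pvStepB (0, none) x)).1
  rw [show pvStepB (0, none) x = (1, some (x + 4)) from rfl]
  rw [pvFold_eq_loopA t 1 (x + 4)]
  rw [pvLoopA_cons]
  have hnot : ¬ (x + 4 < x) := by omega
  simp only [List.filter_cons, decide_eq_true_eq, hnot, if_false]
  norm_num

-- ===== VERDICT (by name: the statement is the Claim_ definition above) =====
theorem place_base_stations_spec : Claim_equal_place_base_stations := by
  intro A _ hpre
  unfold Spec_place_base_stations place_base_stations place_base_stations_alt
  have hne : PySem.List.sorted A (fun x => x) false ≠ [] := by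
    intro h
    apply hpre
    have := congrArg List.length h
    rw [PySem.List.length_sorted] at this
    exact List.length_eq_zero_iff.mp this
  obtain ⟨x, t, hxt⟩ := List.exists_cons_of_ne_nil hne
  simp only [hxt]
  exact pvMain x t
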